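-- pv_equiv track=rewrite | github.com/valiantseal/metagen | ARVAR/processVar/parseGb.py | reformPrevNext
-- ===== SOURCE A (Python) =====
-- def prevElem(my_list, i, n):
--   for elem in range(i-1, -1, -1):
--     prevElem = my_list[elem]
--     if prevElem != n:
--       newElem = prevElem
--       break
--   return newElem
--
-- def nextElem(my_list, i, n):
--   for elem in range(i, len(my_list)):
--     nextElem = my_list[elem]
--     if nextElem != n:
--       newElem = nextElem
--       break
--   return newElem
--
-- def reformPrevNext(my_list, n):
--   resList = []
--   for i in range(len(my_list)):
--     curVal = my_list[i]
--     if curVal == n: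
--       prevVal = prevElem(my_list, i, n)
--       nextVal = nextElem(my_list, i, n)
--       newVal = "_".join([str(prevVal), str(curVal), str(nextVal)])
--     else:
--       newVal = str(curVal)
--     resList.append(newVal)
--   return resList
-- ===== SOURCE B (Python) =====
-- def _nearest_before(lst, n):
--     # res[i] = nearest element != n strictly before index i (None if there is none)
--     res = []
--     last = None
--     for v in lst:
--         res.append(last)
--         if v != n:
--             last = v
--     return res
--
-- def reformPrevNext(my_list, n):
--     prev = _nearest_before(my_list, n)
--     nxt = _nearest_before(my_list[::-1], n)[::-1]
--     out = []
--     for v, p, x in zip(my_list, prev, nxt):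
--         out.append("{}_{}_{}".format(p, v, x) if v == n else str(v))
--     return out
-- ===== Notes on version B (the rewrite author's own statement) =====
-- stated objective: alternative
-- what changed: Instead of rescanning the list leftwards and rightwards from every n-valued position, B precomputes the nearest non-n neighbour of every index in two linear passes (one forward, one over the reversed list) and builds the output in a single zip; this removes A's inner scans (quadratic only when many elements equal n, so not measurably faster on random inputs).
import Mathlib
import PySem

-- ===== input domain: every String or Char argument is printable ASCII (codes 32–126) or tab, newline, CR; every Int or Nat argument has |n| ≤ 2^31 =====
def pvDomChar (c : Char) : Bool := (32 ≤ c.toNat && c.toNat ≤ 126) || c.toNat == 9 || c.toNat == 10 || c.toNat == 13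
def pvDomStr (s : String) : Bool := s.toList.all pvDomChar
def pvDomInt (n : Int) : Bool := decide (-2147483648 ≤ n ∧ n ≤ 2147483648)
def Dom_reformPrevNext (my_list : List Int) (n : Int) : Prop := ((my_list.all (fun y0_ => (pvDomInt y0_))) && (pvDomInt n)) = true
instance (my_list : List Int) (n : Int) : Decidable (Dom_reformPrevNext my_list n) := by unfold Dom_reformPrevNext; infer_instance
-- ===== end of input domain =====

-- B replaces A's per-index backward/forward rescans by two linear passes that precompute,
-- for every index, the nearest non-n element before/after it (objective: alternative).

-- ===== PORT A =====
-- the body of A's break-style search loops: keep the first element found to differ from n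
-- (the accumulator staying 'some' models Python's 'break'; 'none' at the end = unbound
-- 'newElem', Python's NameError — unreachable under Pre_)
def pvStepVal (n : Int) (acc : Option Int) (x : Int) : Option Int :=
  match acc with
  | some _ => acc
  | none => if x != n then some x else none

-- prevElem: for elem in range(i-1, -1, -1): if my_list[elem] != n: newElem = …; break
def pvPrevElem (my_list : List Int) (i : Int) (n : Int) : Option Int :=
  (PySem.List.pyRange (i - 1) (-1) (-1)).foldl
    (fun newElem elem => pvStepVal n newElem (PySem.List.pyGetD my_list elem 0)) none

-- nextElem: for elem in range(i, len(my_list)): if my_list[elem] != n: newElem = …; break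
def pvNextElem (my_list : List Int) (i : Int) (n : Int) : Option Int :=
  (PySem.List.pyRange i (my_list.length : Int) 1).foldl
    (fun newElem elem => pvStepVal n newElem (PySem.List.pyGetD my_list elem 0)) none

-- str() of a value that may be Python-unbound; "" is arbitrary (Python raises NameError there;
-- unreachable under Pre_)
def pvOptStrA (o : Option Int) : String :=
  match o with
  | some x => PySem.Int.toStr x
  | none => ""

def reformPrevNext (my_list : List Int) (n : Int) : List String :=
  (PySem.List.pyRange 0 (my_list.length : Int) 1).foldl
    (fun resList i =>
      let curVal := PySem.List.pyGetD my_list i 0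
      let newVal :=
        if curVal = n then
          let prevVal := pvPrevElem my_list i n
          let nextVal := pvNextElem my_list i n
          PySem.Str.join "_" [pvOptStrA prevVal, PySem.Int.toStr curVal, pvOptStrA nextVal]
        else PySem.Int.toStr curVal
      resList ++ [newVal]) []

-- ===== PORT B =====
-- _nearest_before: res[i] = nearest element != n strictly before index i ('last' carried along)
def pvNearestBefore (n : Int) : List Int → Option Int → List (Option Int)
  | [], _ => []
  | v :: t, last => last :: pvNearestBefore n t (if v != n then some v else last)

-- "{}".format of an Optional value: None prints as "None"
def pvFmtB (o : Option Int) : String :=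
  match o with
  | some x => PySem.Int.toStr x
  | none => "None"

def reformPrevNext_alt (my_list : List Int) (n : Int) : List String :=
  let prev := pvNearestBefore n my_list none
  let nxt := (pvNearestBefore n my_list.reverse none).reverse
  (my_list.zip (prev.zip nxt)).map (fun vpx =>
    if vpx.1 = n then pvFmtB vpx.2.1 ++ "_" ++ PySem.Int.toStr vpx.1 ++ "_" ++ pvFmtB vpx.2.2
    else PySem.Int.toStr vpx.1)

-- ===== PRECONDITION & SPEC =====
-- Pre_ excludes exactly the inputs on which Python A raises NameError: some element equals n
-- but no non-n element lies before it (first element = n) or after it (last element = n).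
def Pre_reformPrevNext (my_list : List Int) (n : Int) : Prop :=
  n ∈ my_list → my_list.head? ≠ some n ∧ my_list.getLast? ≠ some n
instance (my_list : List Int) (n : Int) : Decidable (Pre_reformPrevNext my_list n) := by
  unfold Pre_reformPrevNext; infer_instance
def pvWitness_reformPrevNext : List Int × Int := ([1, 5, 5, 2, 5, 3], 5)

def Spec_reformPrevNext (my_list : List Int) (n : Int) (out : List String) : Prop := out = reformPrevNext_alt my_list n
instance (my_list : List Int) (n : Int) (out : List String) : Decidable (Spec_reformPrevNext my_list n out) := by unfold Spec_reformPrevNext; infer_instance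

-- ===== CLAIM (what is proved, stated in full; the proofs are below) =====
def Claim_equal_reformPrevNext : Prop := ∀ (my_list : List Int) (n : Int), Dom_reformPrevNext my_list n → Pre_reformPrevNext my_list n → Spec_reformPrevNext my_list n (reformPrevNext my_list n)

-- ===== LEMMAS AND PROOFS =====

theorem pvStepVal_some (n x : Int) (a : Int) : pvStepVal n (some a) x = some a := rfl

theorem foldl_stepVal_acc {α : Type} (n : Int) (h : α → Int) :
    ∀ (xs : List α) (acc : Option Int),
      xs.foldl (fun a e => pvStepVal n a (h e)) acc
        = acc.or (xs.foldl (fun a e => pvStepVal n a (h e)) none) := by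
  intro xs
  induction xs with
  | nil => intro acc; cases acc <;> simp
  | cons x t ih =>
    intro acc
    cases acc with
    | none => simp
    | some a =>
      rw [List.foldl_cons, pvStepVal_some, ih (some a)]
      simp [Option.or]

theorem foldl_stepVal_find (n : Int) :
    ∀ (xs : List Int), xs.foldl (pvStepVal n) none = xs.find? (· != n) := by
  intro xs
  induction xs with
  | nil => rfl
  | cons x t ih =>
    rw [List.foldl_cons, List.find?_cons]
    by_cases hv : (x != n) = true
    · have : pvStepVal n none x = some x := by simp [pvStepVal, hv]
      rw [this]
      have := foldl_stepVal_acc n (id : Int → Int) t (some x)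
      simp only [id] at this
      simp [hv, this, Option.or]
    · have h0 : pvStepVal n none x = none := by
        simp only [pvStepVal]; simp at hv; simp [hv]
      rw [h0, ih]
      simp at hv
      simp [hv]

theorem pvPrevElem_eq (my_list : List Int) (n : Int) :
    ∀ (k : Nat), k ≤ my_list.length →
      pvPrevElem my_list (k : Int) n = (my_list.take k).reverse.find? (· != n) := by
  intro k
  induction k with
  | zero =>
    intro _
    rw [pvPrevElem]
    norm_num
  | succ k ih =>
    intro hk
    have hk' : k < my_list.length := by omega
    unfold pvPrevElem
    have h1 : ((k + 1 : Nat) : Int) - 1 = (k : Int) := by push_cast; ring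
    rw [h1, PySem.List.pyRange_neg_one_cons (by omega : (-1:Int) < (k:Int))]
    rw [List.foldl_cons, foldl_stepVal_acc]
    have hget : PySem.List.pyGetD my_list (k : Int) 0 = my_list[k] := by
      simp [PySem.List.pyGetD_natCast, hk']
    have hta : my_list.take (k+1) = my_list.take k ++ [my_list[k]] := by
      rw [List.take_add_one]; simp [List.getElem?_eq_getElem hk']
    rw [hta, List.reverse_append, List.reverse_singleton, List.singleton_append,
        List.find?_cons]
    have ihr := ih (by omega)
    unfold pvPrevElem at ihr
    rw [hget, ihr]
    by_cases hv : (my_list[k] != n) = true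
    · simp [pvStepVal, hv, Option.or]
    · simp only [pvStepVal]
      simp at hv
      simp [hv, Option.or]

theorem pvNextElem_eq (my_list : List Int) (n : Int) (k : Nat) :
    pvNextElem my_list (k : Int) n = (my_list.drop k).find? (· != n) := by
  rw [pvNextElem,
      PySem.List.foldl_pyRange_pyGetD' my_list 0 (pvStepVal n) none (by positivity)]
  rw [Int.toNat_natCast, foldl_stepVal_find]

theorem pvNearestBefore_length (n : Int) :
    ∀ (l : List Int) (last : Option Int), (pvNearestBefore n l last).length = l.length := by
  intro l
  induction l with
  | nil => intro last; rfl
  | cons v t ih => intro last; simp [pvNearestBefore, ih]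

theorem pvNearestBefore_getElem? (n : Int) :
    ∀ (l : List Int) (last : Option Int) (k : Nat), k < l.length →
      (pvNearestBefore n l last)[k]? = some (((l.take k).reverse.find? (· != n)).or last) := by
  intro l
  induction l with
  | nil => intro last k hk; simp at hk
  | cons v t ih =>
    intro last k hk
    cases k with
    | zero => simp [pvNearestBefore]
    | succ k =>
      simp only [pvNearestBefore, List.getElem?_cons_succ]
      rw [ih _ k (by simpa using hk)]
      simp only [List.take_succ_cons, List.reverse_cons, List.find?_append]
      by_cases hv : (v != n) = true
      · cases hfind : (t.take k).reverse.find? (· != n) <;> simp [hv, Option.or]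
      · simp at hv
        cases hfind : (t.take k).reverse.find? (· != n) <;> simp [hv, Option.or]

theorem pv_join3 (a b c : String) :
    PySem.Str.join "_" [a, b, c] = a ++ "_" ++ b ++ "_" ++ c := by
  simp [PySem.Str.join, PySem.Chars.join, String.ext_iff, List.intercalate]

-- ===== VERDICT (by name: the statement is the Claim_ definition above) =====
theorem reformPrevNext_spec : Claim_equal_reformPrevNext := by
  intro l n _dom hpre
  unfold Spec_reformPrevNext reformPrevNext reformPrevNext_alt
  rw [PySem.List.foldl_append_singleton_eq_map, List.nil_append]
  have hlp : ∀ last, (pvNearestBefore n l last).length = l.length := fun last => pvNearestBefore_length n l last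
  apply List.ext_getElem
  · simp [PySem.List.length_pyRange_one, pvNearestBefore_length]
  · intro i h1 h2
    have hi : i < l.length := by
      simpa [PySem.List.length_pyRange_one] using h1
    simp only [List.getElem_map, PySem.List.getElem_pyRange_one, List.getElem_zip, zero_add]
    have hprev : (pvNearestBefore n l none)[i]'(by rw [hlp]; exact hi)
        = (l.take i).reverse.find? (· != n) := by
      have := pvNearestBefore_getElem? n l none i hi
      rw [List.getElem?_eq_getElem (by rw [hlp]; exact hi)] at this
      simpa [Option.or_none] using this
    have hrevshape : l.reverse.take (l.length - 1 - i) = (l.drop (i+1)).reverse := by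
      rw [List.reverse_drop]
      congr 1
      omega
    have hnxt : ((pvNearestBefore n l.reverse none).reverse)[i]'(by simp [pvNearestBefore_length]; exact hi)
        = (l.drop (i+1)).find? (· != n) := by
      have hlen : (pvNearestBefore n l.reverse none).length = l.length := by
        rw [pvNearestBefore_length, List.length_reverse]
      have hq : (pvNearestBefore n l.reverse none).reverse[i]? = some ((l.drop (i+1)).find? (· != n)) := by
        rw [List.getElem?_reverse (by rw [hlen]; exact hi), hlen]
        have h := pvNearestBefore_getElem? n l.reverse none (l.length - 1 - i) (by simp; omega)
        rw [h, hrevshape, List.reverse_reverse, Option.or_none]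
      obtain ⟨_, hv⟩ := List.getElem?_eq_some_iff.mp hq
      exact hv
    have hg : PySem.List.pyGetD l (i : Int) 0 = l[i] := by
      simp [PySem.List.pyGetD_natCast, hi]
    rw [hg]
    by_cases hc : l[i] = n
    · rw [if_pos hc, if_pos hc]
      rw [pvPrevElem_eq l n i (le_of_lt hi), pvNextElem_eq l n i]
      have hmem : n ∈ l := by rw [← hc]; exact List.getElem_mem hi
      obtain ⟨hhead, hlast⟩ := hpre hmem
      have hl0 : l[0]'(by omega) ≠ n := by
        intro he
        apply hhead
        rw [List.head?_eq_getElem?, List.getElem?_eq_getElem (by omega : 0 < l.length), he]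
      have hipos : 0 < i := by
        rcases Nat.eq_zero_or_pos i with h0 | h
        · exact absurd (by subst h0; exact hc) hl0
        · exact h
      have hx : ∃ x, (l.take i).reverse.find? (· != n) = some x := by
        have hte : (l.take i)[0]'(by simp; omega) = l[0]'(by omega) := List.getElem_take
        have h0 : l[0]'(by omega) ∈ (l.take i).reverse := by
          rw [List.mem_reverse, ← hte]
          exact List.getElem_mem _
        exact Option.isSome_iff_exists.mp
          (List.find?_isSome.mpr ⟨_, h0, by simpa using hl0⟩)
      obtain ⟨x, hx⟩ := hx
      have hlv : l[l.length - 1]'(by omega) ≠ n := by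
        intro he
        apply hlast
        rw [List.getLast?_eq_getElem?, List.getElem?_eq_getElem (by omega : l.length - 1 < l.length), he]
      have hine : i ≠ l.length - 1 := by
        intro he
        apply hlv
        have hsw : l[l.length - 1]'(by omega) = l[i] := by
          congr 1
          omega
        rw [hsw, hc]
      have hy : ∃ y, (l.drop (i+1)).find? (· != n) = some y := by
        have hlt : l.length - 1 - (i+1) < (l.drop (i+1)).length := by simp; omega
        have hde : (l.drop (i+1))[l.length - 1 - (i+1)]'hlt = l[l.length - 1]'(by omega) := by
          rw [List.getElem_drop]
          congr 1
          omega
        have hm : l[l.length - 1]'(by omega) ∈ l.drop (i+1) := by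
          rw [← hde]; exact List.getElem_mem _
        exact Option.isSome_iff_exists.mp
          (List.find?_isSome.mpr ⟨_, hm, by simpa using hlv⟩)
      obtain ⟨y, hy⟩ := hy
      have hdrop : l.drop i = l[i] :: l.drop (i+1) := (List.getElem_cons_drop hi).symm
      rw [hdrop, List.find?_cons, hprev, hnxt, hx, hy]
      simp [pvOptStrA, pvFmtB, pv_join3, hc]
    · rw [if_neg hc, if_neg hc]
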